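-- pv_equiv track=rewrite | github.com/MrBrantCode/unitest_baseline | mut_generate/mist_train_cf/cf_55474/solution.py | move_three_balls
-- ===== SOURCE A (Python) =====
-- def move_three_balls(arr):
--     if len(arr) == 0:
--         return True
--
--     swaps = [0]*len(arr)
--     temp = arr.copy()
--     temp.sort()
--     for i in range(len(arr)):
--         if arr[i] != temp[i]:
--             swaps[i] = 1
--
--     if sum(swaps) > 6:
--         return False
--
--     for i in range(0, len(arr), 2):
--         if arr[i] % 2 != 0:
--             for j in range(1, len(arr), 2):
--                if arr[j] % 2 == 0:
--                    arr[i], arr[j] = arr[j], arr[i]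
--                    break
--
--     odd_count = len([x for x in arr if x < arr[0]])
--     if odd_count % 2 == 0:
--         for i in range(1, len(arr)):
--             if arr[i] > arr[0]:
--                 arr[0], arr[i] = arr[i], arr[0]
--                 break
--
--     return arr == sorted(arr)
-- ===== SOURCE B (Python) =====
-- def move_three_balls(arr):
--     # Return-value equivalent to A; does NOT mutate arr (A sorts/swaps it in place).
--     if not arr:
--         return True
--     s = sorted(arr)
--     if sum(x != y for x, y in zip(arr, s)) > 6:
--         return False
--     a = list(arr)
--     n = len(a)
--     j = 1  # advancing pointer over odd indices: everything before j is odd-valued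
--     for i in range(0, n, 2):
--         if a[i] % 2 != 0:
--             while j < n and a[j] % 2 != 0:
--                 j += 2
--             if j < n:
--                 a[i], a[j] = a[j], a[i]
--     cnt = sum(1 for x in a if x < a[0])
--     if cnt % 2 == 0:
--         k = next((i for i in range(1, n) if a[i] > a[0]), None)
--         if k is not None:
--             a[0], a[k] = a[k], a[0]
--     return a == sorted(a)
-- ===== Notes on version B (the rewrite author's own statement) =====
-- stated objective: alternative
-- what changed: The even-index pass no longer rescans all odd indices from the start for each swap: a single advancing pointer walks the odd indices once (everything before it stays odd-valued), and the mismatch count is a one-pass zip count instead of a mutated indicator array; B also does not mutate its argument (return-value equivalence).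
import Mathlib
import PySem

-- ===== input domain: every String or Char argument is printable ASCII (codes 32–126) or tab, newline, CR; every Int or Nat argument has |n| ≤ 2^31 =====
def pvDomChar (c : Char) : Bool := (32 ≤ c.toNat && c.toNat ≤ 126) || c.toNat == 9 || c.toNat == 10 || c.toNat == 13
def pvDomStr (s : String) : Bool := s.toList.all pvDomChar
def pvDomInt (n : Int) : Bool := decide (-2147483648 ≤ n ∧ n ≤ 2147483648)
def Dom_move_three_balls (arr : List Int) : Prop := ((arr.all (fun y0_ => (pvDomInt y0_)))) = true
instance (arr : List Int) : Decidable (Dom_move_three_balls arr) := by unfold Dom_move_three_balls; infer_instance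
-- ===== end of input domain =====

-- B replaces A's rescanning inner loop by a single advancing pointer over the odd indices
-- (objective: alternative). Equivalence is about the RETURN value only: A sorts and swaps its
-- argument in place, B leaves it untouched.

-- ===== PORT A =====
-- Python's tuple swap arr[i], arr[j] = arr[j], arr[i]; all indices used are in range, so getD _ 0 is exact.
def pySwap (a : List Int) (i j : Nat) : List Int :=
  (a.set i (a.getD j 0)).set j (a.getD i 0)

-- port of range(s, n, 2) (nonnegative bounds, as in both Pythons)
def range2 (s n : Nat) : List Nat :=
  if s < n then s :: range2 (s + 2) n else []
termination_by n - s
decreasing_by omega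

-- swaps = [0]*len(arr); for i in range(len(arr)): if arr[i] != temp[i]: swaps[i] = 1
def mbSwapsList (a t : List Int) : List Int :=
  (List.range a.length).foldl
    (fun sw i => if a.getD i 0 ≠ t.getD i 0 then sw.set i 1 else sw)
    (List.replicate a.length 0)

-- inner loop: for j in range(1, len(arr), 2): if arr[j] % 2 == 0: swap; break
def mbInnerA (a : List Int) (i : Nat) : List Nat → List Int
  | [] => a
  | j :: js => if PySem.Int.mod (a.getD j 0) 2 = 0 then pySwap a i j else mbInnerA a i js

-- outer loop: for i in range(0, len(arr), 2): if arr[i] % 2 != 0: <inner loop>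
def mbOuterA : List Int → List Nat → List Int
  | a, [] => a
  | a, i :: is =>
    if PySem.Int.mod (a.getD i 0) 2 ≠ 0 then
      mbOuterA (mbInnerA a i (range2 1 a.length)) is
    else mbOuterA a is

-- for i in range(1, len(arr)): if arr[i] > arr[0]: swap; break
def mbHeadA (a : List Int) : List Nat → List Int
  | [] => a
  | i :: is => if a.getD 0 0 < a.getD i 0 then pySwap a 0 i else mbHeadA a is

def move_three_balls (arr : List Int) : Bool :=
  if arr.length = 0 then true
  else
    let temp := PySem.List.sorted arr (fun x => x)
    let swaps := mbSwapsList arr temp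
    if 6 < swaps.sum then false
    else
      let a1 := mbOuterA arr (range2 0 arr.length)
      let oddCount := (a1.filter (fun x => decide (x < a1.getD 0 0))).length
      let a2 := if oddCount % 2 = 0 then mbHeadA a1 (List.range' 1 (a1.length - 1)) else a1
      decide (a2 = PySem.List.sorted a2 (fun x => x))

-- ===== PORT B =====
-- while j < n and a[j] % 2 != 0: j += 2
def mbAdvance (a : List Int) (j : Nat) : Nat :=
  if j < a.length then
    if PySem.Int.mod (a.getD j 0) 2 ≠ 0 then mbAdvance a (j + 2) else j
  else j
termination_by a.length - j
decreasing_by omega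

-- for i in range(0, n, 2): if a[i] % 2 != 0: advance j; if j < n: swap
def mbOuterB : List Int → Nat → List Nat → List Int
  | a, _, [] => a
  | a, j, i :: is =>
    if PySem.Int.mod (a.getD i 0) 2 ≠ 0 then
      let j' := mbAdvance a j
      if j' < a.length then mbOuterB (pySwap a i j') j' is
      else mbOuterB a j' is
    else mbOuterB a j is

-- k = next((i for i in range(1, n) if a[i] > a[0]), None); if k is not None: swap
def mbHeadB (a : List Int) : List Int :=
  match (List.range' 1 (a.length - 1)).find? (fun i => decide (a.getD 0 0 < a.getD i 0)) with
  | some k => pySwap a 0 k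
  | none => a

def move_three_balls_alt (arr : List Int) : Bool :=
  if arr.isEmpty then true
  else
    let s := PySem.List.sorted arr (fun x => x)
    if 6 < (arr.zip s).countP (fun p => decide (p.1 ≠ p.2)) then false
    else
      let a1 := mbOuterB arr 1 (range2 0 arr.length)
      let cnt := a1.countP (fun x => decide (x < a1.getD 0 0))
      let a2 := if cnt % 2 = 0 then mbHeadB a1 else a1
      decide (a2 = PySem.List.sorted a2 (fun x => x))

-- ===== PRECONDITION & SPEC =====
def Spec_move_three_balls (arr : List Int) (out : Bool) : Prop := out = move_three_balls_alt arr
instance (arr : List Int) (out : Bool) : Decidable (Spec_move_three_balls arr out) := by unfold Spec_move_three_balls; infer_instance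

-- ===== CLAIM (what is proved, stated in full; the proofs are below) =====
def Claim_equal_move_three_balls : Prop := ∀ (arr : List Int), Dom_move_three_balls arr → Spec_move_three_balls arr (move_three_balls arr)

-- ===== LEMMAS AND PROOFS =====

theorem getD_set_ne (l : List Int) (i k : Nat) (x : Int) (h : k ≠ i) :
    (l.set i x).getD k 0 = l.getD k 0 := by
  simp [List.getD, List.getElem?_set_ne (Ne.symm h)]

theorem pySwap_length (a : List Int) (i j : Nat) : (pySwap a i j).length = a.length := by
  simp [pySwap]

theorem pySwap_getD_ne (a : List Int) (i j k : Nat) (hi : k ≠ i) (hj : k ≠ j) :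
    (pySwap a i j).getD k 0 = a.getD k 0 := by
  unfold pySwap
  rw [getD_set_ne _ j k _ hj, getD_set_ne _ i k _ hi]

theorem r2_mem (s n k : Nat) (h : k ∈ range2 s n) : k % 2 = s % 2 := by
  rw [range2] at h
  by_cases hs : s < n
  · simp only [if_pos hs, List.mem_cons] at h
    rcases h with rfl | h
    · rfl
    · have := r2_mem (s + 2) n k h
      omega
  · simp [if_neg hs] at h
termination_by n - s
decreasing_by omega

theorem adv_of_ge (a : List Int) (j : Nat) (h : ¬ j < a.length) : mbAdvance a j = j := by
  rw [mbAdvance]; simp [h]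

theorem adv_parity (a : List Int) (j : Nat) : mbAdvance a j % 2 = j % 2 := by
  rw [mbAdvance]
  by_cases h : j < a.length
  · by_cases h2 : PySem.Int.mod (a.getD j 0) 2 ≠ 0
    · simp only [if_pos h, if_pos h2]
      have := adv_parity a (j + 2)
      omega
    · simp only [if_pos h, if_neg h2]
  · simp only [if_neg h]
termination_by a.length - j
decreasing_by omega

theorem adv_visited (a : List Int) (j k : Nat) (h1 : j ≤ k) (h2 : k < mbAdvance a j)
    (h3 : k % 2 = j % 2) : k < a.length ∧ PySem.Int.mod (a.getD k 0) 2 ≠ 0 := by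
  rw [mbAdvance] at h2
  by_cases hj : j < a.length
  · by_cases hm : PySem.Int.mod (a.getD j 0) 2 ≠ 0
    · simp only [if_pos hj, if_pos hm] at h2
      by_cases hk : k = j
      · subst hk; exact ⟨hj, hm⟩
      · exact adv_visited a (j + 2) k (by omega) h2 (by omega)
    · simp only [if_pos hj, if_neg hm] at h2
      omega
  · simp only [if_neg hj] at h2
    omega
termination_by a.length - j
decreasing_by omega

theorem innerA_eq (a : List Int) (i s : Nat) :
    mbInnerA a i (range2 s a.length) =
      if mbAdvance a s < a.length then pySwap a i (mbAdvance a s) else a := by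
  rw [range2, mbAdvance]
  by_cases hs : s < a.length
  · by_cases hm : PySem.Int.mod (a.getD s 0) 2 = 0
    · have hm' : ¬ PySem.Int.mod (a.getD s 0) 2 ≠ 0 := by simpa using hm
      simp only [if_pos hs, if_neg hm', mbInnerA, if_pos hm]
    · have hm' : PySem.Int.mod (a.getD s 0) 2 ≠ 0 := hm
      simp only [if_pos hs, if_pos hm', mbInnerA, if_neg hm]
      exact innerA_eq a i (s + 2)
  · simp only [if_neg hs, mbInnerA]
termination_by a.length - s
decreasing_by omega

theorem adv_inv (a : List Int) (s j : Nat) (hsj : s ≤ j) (hpar : s % 2 = j % 2)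
    (hodd : j % 2 = 1)
    (hinv : ∀ k, k % 2 = 1 → s ≤ k → k < j → k < a.length → PySem.Int.mod (a.getD k 0) 2 ≠ 0) :
    mbAdvance a s = mbAdvance a j ∨ (a.length ≤ mbAdvance a s ∧ a.length ≤ mbAdvance a j) := by
  by_cases hs : s = j
  · subst hs; left; rfl
  · have hlt : s < j := lt_of_le_of_ne hsj hs
    by_cases hn : s < a.length
    · have hmod := hinv s (by omega) le_rfl hlt hn
      have hstep : mbAdvance a s = mbAdvance a (s + 2) := by
        rw [mbAdvance]
        simp only [if_pos hn, if_pos hmod]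
      rw [hstep]
      exact adv_inv a (s + 2) j (by omega) (by omega) hodd
        (fun k hk1 hk2 hk3 hk4 => hinv k hk1 (by omega) hk3 hk4)
    · right
      refine ⟨by rw [adv_of_ge a s hn]; omega, by rw [adv_of_ge a j (by omega)]; omega⟩
termination_by j - s
decreasing_by omega

theorem outer_eq (is : List Nat) (a : List Int) (j : Nat)
    (hev : ∀ i ∈ is, i % 2 = 0) (hodd : j % 2 = 1)
    (hinv : ∀ k, k % 2 = 1 → k < j → k < a.length → PySem.Int.mod (a.getD k 0) 2 ≠ 0) :
    mbOuterA a is = mbOuterB a j is := by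
  induction is generalizing a j with
  | nil => rfl
  | cons i is ih =>
    have hie : i % 2 = 0 := hev i (List.mem_cons_self ..)
    have hev' : ∀ i' ∈ is, i' % 2 = 0 := fun i' hi' => hev i' (List.mem_cons_of_mem _ hi')
    simp only [mbOuterA, mbOuterB]
    by_cases hc : PySem.Int.mod (a.getD i 0) 2 ≠ 0
    · simp only [if_pos hc]
      rw [innerA_eq]
      rcases adv_inv a 1 j (by omega) (by omega) hodd
          (fun k hk1 hk2 hk3 hk4 => hinv k hk1 hk3 hk4) with heq | ⟨hge1, hgej⟩
      · rw [heq]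
        have hinv' : ∀ k, k % 2 = 1 → k < mbAdvance a j → k < a.length →
            PySem.Int.mod (a.getD k 0) 2 ≠ 0 := by
          intro k hk1 hk2 hk3
          by_cases hkj : k < j
          · exact hinv k hk1 hkj hk3
          · exact (adv_visited a j k (by omega) hk2 (by omega)).2
        by_cases hlt : mbAdvance a j < a.length
        · simp only [if_pos hlt]
          apply ih (pySwap a i (mbAdvance a j)) (mbAdvance a j) hev'
            (by have := adv_parity a j; omega)
          intro k hk1 hk2 hk3
          rw [pySwap_length] at hk3
          rw [pySwap_getD_ne a i _ k (by omega) (by omega)]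
          exact hinv' k hk1 hk2 hk3
        · simp only [if_neg hlt]
          exact ih a (mbAdvance a j) hev' (by have := adv_parity a j; omega) hinv'
      · have hA : ¬ mbAdvance a 1 < a.length := by omega
        have hB : ¬ mbAdvance a j < a.length := by omega
        simp only [if_neg hA, if_neg hB]
        apply ih a (mbAdvance a j) hev' (by have := adv_parity a j; omega)
        intro k hk1 hk2 hk3
        by_cases hkj : k < j
        · exact hinv k hk1 hkj hk3
        · exact (adv_visited a j k (by omega) hk2 (by omega)).2
    · simp only [if_neg hc]
      exact ih a j hev' hodd hinv

theorem sum_set_int (sw : List Int) (i : Nat) (x : Int) (h : i < sw.length) :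
    (sw.set i x).sum = sw.sum - sw.getD i 0 + x := by
  induction sw generalizing i with
  | nil => simp at h
  | cons y sw ih =>
    cases i with
    | zero => simp [List.set, List.getD]; ring
    | succ i =>
      simp only [List.set, List.sum_cons, List.getD_cons_succ]
      rw [ih i (by simpa using h)]
      ring

theorem foldl_set_sum (p : Nat → Prop) [DecidablePred p] (l : List Nat) (sw : List Int)
    (h : ∀ i ∈ l, i < sw.length ∧ sw.getD i 0 = 0) (hn : l.Nodup) :
    (l.foldl (fun sw i => if p i then sw.set i 1 else sw) sw).sum =
      sw.sum + (l.countP (fun i => decide (p i)) : Int) := by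
  induction l generalizing sw with
  | nil => simp
  | cons i l ih =>
    obtain ⟨hi, hz⟩ := h i (List.mem_cons_self ..)
    have hnotmem : i ∉ l := (List.nodup_cons.mp hn).1
    by_cases hp : p i
    · simp only [List.foldl_cons, if_pos hp]
      rw [ih (sw.set i 1) ?_ (List.Nodup.of_cons hn)]
      · rw [sum_set_int sw i 1 hi, hz]
        simp only [List.countP_cons, hp, decide_true, if_pos]
        push_cast
        ring
      · intro jj hjj
        refine ⟨by simpa using h jj (List.mem_cons_of_mem _ hjj) |>.1, ?_⟩
        rw [getD_set_ne sw i jj 1 (by rintro rfl; exact hnotmem hjj)]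
        exact (h jj (List.mem_cons_of_mem _ hjj)).2
    · simp only [List.foldl_cons, if_neg hp]
      rw [ih sw (fun jj hjj => h jj (List.mem_cons_of_mem _ hjj)) (List.Nodup.of_cons hn)]
      simp [hp]

theorem swaps_sum (a t : List Int) :
    (mbSwapsList a t).sum =
      ((List.range a.length).countP (fun i => decide (a.getD i 0 ≠ t.getD i 0)) : Int) := by
  unfold mbSwapsList
  rw [foldl_set_sum (p := fun i => a.getD i 0 ≠ t.getD i 0)]
  · simp
  · intro i hi
    rw [List.mem_range] at hi
    exact ⟨by simpa using hi, List.getD_replicate 0 hi⟩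
  · exact List.nodup_range

theorem countP_zip_range (a t : List Int) (h : t.length = a.length) :
    (a.zip t).countP (fun p => decide (p.1 ≠ p.2)) =
      (List.range a.length).countP (fun i => decide (a.getD i 0 ≠ t.getD i 0)) := by
  induction a generalizing t with
  | nil => simp
  | cons x a ih =>
    cases t with
    | nil => simp at h
    | cons y t =>
      have ht : t.length = a.length := by simpa using h
      simp only [List.zip_cons_cons, List.countP_cons, List.length_cons,
        List.range_succ_eq_map, List.countP_map]
      rw [show ((fun i => decide ((x :: a).getD i 0 ≠ (y :: t).getD i 0)) ∘ Nat.succ)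
            = (fun i => decide (a.getD i 0 ≠ t.getD i 0)) from
          funext (fun i => by simp)]
      rw [ih t ht]
      simp [List.getD]

theorem head_eq (a : List Int) (l : List Nat) :
    mbHeadA a l =
      (match l.find? (fun i => decide (a.getD 0 0 < a.getD i 0)) with
       | some k => pySwap a 0 k
       | none => a) := by
  induction l with
  | nil => simp [mbHeadA, List.find?]
  | cons i l ih =>
    by_cases h : a.getD 0 0 < a.getD i 0
    · simp only [mbHeadA, List.find?, if_pos h, decide_eq_true h]
    · have hd : decide (a.getD 0 0 < a.getD i 0) = false := decide_eq_false h
      simp only [mbHeadA, List.find?, if_neg h, hd, ih]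

-- ===== VERDICT (by name: the statement is the Claim_ definition above) =====
theorem move_three_balls_spec : Claim_equal_move_three_balls := by
  intro arr _
  unfold Spec_move_three_balls move_three_balls move_three_balls_alt
  by_cases he : arr.length = 0
  · have : arr = [] := List.length_eq_zero_iff.mp he
    subst this
    simp
  · have hne : arr.isEmpty = false := by
      cases arr
      · simp at he
      · simp
    simp only [if_neg he, hne, Bool.false_eq_true, if_false]
    have hlen : (PySem.List.sorted arr (fun x => x)).length = arr.length :=
      PySem.List.length_sorted arr (fun x => x) false
    have hsum : (mbSwapsList arr (PySem.List.sorted arr (fun x => x))).sum =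
        (((arr.zip (PySem.List.sorted arr (fun x => x))).countP
          (fun p => decide (p.1 ≠ p.2)) : Nat) : Int) := by
      rw [swaps_sum, countP_zip_range _ _ hlen]
    by_cases hbig :
        6 < (arr.zip (PySem.List.sorted arr (fun x => x))).countP (fun p => decide (p.1 ≠ p.2))
    · have h6 : (6 : Int) < (mbSwapsList arr (PySem.List.sorted arr (fun x => x))).sum := by
        rw [hsum]; exact_mod_cast hbig
      rw [if_pos h6, if_pos hbig]
    · have h6 : ¬ (6 : Int) < (mbSwapsList arr (PySem.List.sorted arr (fun x => x))).sum := by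
        rw [hsum]; exact_mod_cast hbig
      rw [if_neg h6, if_neg hbig]
      have ha1 : mbOuterA arr (range2 0 arr.length) = mbOuterB arr 1 (range2 0 arr.length) := by
        apply outer_eq (range2 0 arr.length) arr 1
        · intro i hi
          have := r2_mem 0 arr.length i hi
          omega
        · rfl
        · intro k hk1 hk2 hk3
          omega
      rw [ha1, ← List.countP_eq_length_filter, head_eq]
      rfl
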